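-- pv_equiv track=rewrite | github.com/psrc/urbansim | opus_core/indicator_framework/indicator_results.py | _get_year_aggregation
-- ===== SOURCE A (Python) =====
-- def _get_year_aggregation(years):
--     """Given a sequence of years, outputs a string that represents the years with dashes
--        between consecutive years (e.g. "1983,1985-1987,1999")
--     """
--     years = list(years) #traits funniness
--     years.sort()
--     if years == []: return ''
--     year_aggregation = []
--     (first, last) = (years[0], years[0])
--     for i in range(1,len(years)):
--         if years[i] == last + 1: last = years[i]
--         else:
--             if first == last: year_aggregation.append('%i' % first)
--             else: year_aggregation.append('%i-%i' % (first, last))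
--             (first, last) = (years[i], years[i])
--
--     if first == last: year_aggregation.append('%i' % first)
--     else: year_aggregation.append('%i-%i' % (first, last))
--
--     return ','.join(year_aggregation)
-- ===== SOURCE B (Python) =====
-- def _get_year_aggregation(years):
--     """Given a sequence of years, outputs a string that represents the years with dashes
--        between consecutive years (e.g. "1983,1985-1987,1999")
--     """
--     ys = sorted(years)
--     n = len(ys)
--     if n == 0:
--         return ''
--     bounds = [0] + [i for i in range(1, n) if ys[i] != ys[i - 1] + 1] + [n]
--     parts = ['%i' % ys[a] if b - a == 1 else '%i-%i' % (ys[a], ys[b - 1])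
--              for a, b in zip(bounds, bounds[1:])]
--     return ','.join(parts)
-- ===== Notes on version B (the rewrite author's own statement) =====
-- stated objective: alternative
-- what changed: Replaces A's single-pass first/last state-machine loop with staged passes: a comprehension first computes all run-break indices of the sorted list, then each segment between consecutive bound indices is formatted positionally (ys[a], ys[b-1]) and joined.
import Mathlib
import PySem

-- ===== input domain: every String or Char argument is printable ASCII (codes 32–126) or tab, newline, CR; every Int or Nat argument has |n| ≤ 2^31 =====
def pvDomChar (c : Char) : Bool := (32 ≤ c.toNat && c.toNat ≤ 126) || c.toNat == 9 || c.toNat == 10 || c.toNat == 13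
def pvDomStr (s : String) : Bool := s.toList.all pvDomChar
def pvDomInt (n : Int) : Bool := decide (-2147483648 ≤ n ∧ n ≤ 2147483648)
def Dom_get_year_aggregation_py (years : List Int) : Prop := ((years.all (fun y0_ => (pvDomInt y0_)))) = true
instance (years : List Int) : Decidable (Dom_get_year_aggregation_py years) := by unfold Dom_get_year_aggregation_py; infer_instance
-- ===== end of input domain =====

-- B replaces A's incremental first/last state-machine loop with a staged-passes decomposition:
-- a comprehension computes all run-break indices of the sorted list, then each segment between
-- consecutive bounds is formatted positionally from its endpoint indices; alternative structure, same cost.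


-- ===== PORT A =====
-- A's for-loop over range(1, len(years)) with state (first, last, year_aggregation),
-- including the trailing flush after the loop; the '%i'/'%i-%i' formats are inlined as in A.
def loopA_get_year : List Int → Int → Int → List String → List String
  | [], first, last, acc =>
      if first = last then acc ++ [PySem.Int.toStr first]
      else acc ++ [PySem.Int.toStr first ++ "-" ++ PySem.Int.toStr last]
  | y :: ys, first, last, acc =>
      if y = last + 1 then loopA_get_year ys first y acc
      else if first = last then loopA_get_year ys y y (acc ++ [PySem.Int.toStr first])
      else loopA_get_year ys y y (acc ++ [PySem.Int.toStr first ++ "-" ++ PySem.Int.toStr last])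

def get_year_aggregation_py (years : List Int) : String :=
  match PySem.List.sorted years (fun x => x) false with
  | [] => ""
  | y :: ys => PySem.Str.join "," (loopA_get_year ys y y [])

-- ===== PORT B =====
-- `ys[i] != ys[i - 1] + 1` (indices 1 ≤ i < n are always valid, so pyGetD with default 0 is exact)
def isBrkB (ys : List Int) (i : Int) : Bool :=
  PySem.List.pyGetD ys i 0 != PySem.List.pyGetD ys (i - 1) 0 + 1

-- `'%i' % ys[a] if b - a == 1 else '%i-%i' % (ys[a], ys[b - 1])` (indices valid, pyGetD exact)
def fmtSegB (ys : List Int) (a b : Int) : String :=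
  if b - a = 1 then PySem.Int.toStr (PySem.List.pyGetD ys a 0)
  else PySem.Int.toStr (PySem.List.pyGetD ys a 0) ++ "-" ++ PySem.Int.toStr (PySem.List.pyGetD ys (b - 1) 0)

def get_year_aggregation_py_alt (years : List Int) : String :=
  let ys := PySem.List.sorted years (fun x => x) false
  let n : Int := (ys.length : Int)
  if n = 0 then ""
  else
    let bounds : List Int := 0 :: ((PySem.List.pyRange 1 n 1).filter (fun i => isBrkB ys i) ++ [n])
    PySem.Str.join "," ((bounds.zip bounds.tail).map (fun p => fmtSegB ys p.1 p.2))

-- ===== PRECONDITION & SPEC =====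
def Spec_get_year_aggregation_py (years : List Int) (out : String) : Prop := out = get_year_aggregation_py_alt years
instance (years : List Int) (out : String) : Decidable (Spec_get_year_aggregation_py years out) := by unfold Spec_get_year_aggregation_py; infer_instance

-- ===== CLAIM (what is proved, stated in full; the proofs are below) =====
def Claim_equal_get_year_aggregation_py : Prop := ∀ (years : List Int), Dom_get_year_aggregation_py years → Spec_get_year_aggregation_py years (get_year_aggregation_py years)

-- ===== LEMMAS AND PROOFS =====

-- A's flush of the current (first, last) run
def fmtA_get_year (f l : Int) : String :=
  if f = l then PySem.Int.toStr f else PySem.Int.toStr f ++ "-" ++ PySem.Int.toStr l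

-- accumulator-free (cons) form of A's loop
def partsFrom_get_year : List Int → Int → Int → List String
  | [], f, l => [fmtA_get_year f l]
  | y :: ys, f, l =>
      if y = l + 1 then partsFrom_get_year ys f y
      else fmtA_get_year f l :: partsFrom_get_year ys y y

lemma loopA_eq_partsFrom (ys : List Int) : ∀ (f l : Int) (acc : List String),
    loopA_get_year ys f l acc = acc ++ partsFrom_get_year ys f l := by
  induction ys with
  | nil => intro f l acc; simp [loopA_get_year, partsFrom_get_year, fmtA_get_year]; split <;> simp
  | cons y ys ih =>
      intro f l acc
      simp only [loopA_get_year, partsFrom_get_year]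
      split
      · exact ih f y acc
      · unfold fmtA_get_year
        split <;> simp [ih]

-- the segments [(b0,b1),(b1,b2),…] that B's zip(bounds, bounds[1:]) produces
def segsOf_get_year : Int → List Int → Int → List (Int × Int)
  | a, [], n => [(a, n)]
  | a, b :: bs, n => (a, b) :: segsOf_get_year b bs n

lemma zip_bounds_eq_segsOf : ∀ (l : List Int) (a n : Int),
    (a :: (l ++ [n])).zip (l ++ [n]) = segsOf_get_year a l n := by
  intro l
  induction l with
  | nil => intro a n; simp [segsOf_get_year]
  | cons b bs ih => intro a n; simp only [List.cons_append, List.zip_cons_cons, segsOf_get_year, ih]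

-- A's loop re-indexed over positions of the fixed sorted list ys
def pIdx_get_year (ys : List Int) (i f l : Int) : List String :=
  if h : i < (ys.length : Int) then
    if PySem.List.pyGetD ys i 0 = l + 1 then
      pIdx_get_year ys (i + 1) f (PySem.List.pyGetD ys i 0)
    else fmtA_get_year f l :: pIdx_get_year ys (i + 1) (PySem.List.pyGetD ys i 0) (PySem.List.pyGetD ys i 0)
  else [fmtA_get_year f l]
termination_by ((ys.length : Int) - i).toNat
decreasing_by all_goals omega

lemma partsFrom_eq_pIdx (ys : List Int) (k : Nat) (f l : Int) :
    partsFrom_get_year (ys.drop k) f l = pIdx_get_year ys (k : Int) f l := by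
  by_cases h : k < ys.length
  · rw [List.drop_eq_getElem_cons h]
    have hI : ((k : Int)) < (ys.length : Int) := by exact_mod_cast h
    have hg : PySem.List.pyGetD ys (k : Int) 0 = ys[k] := by
      rw [PySem.List.pyGetD_natCast]; exact List.getD_eq_getElem ys 0 h
    rw [pIdx_get_year, dif_pos hI, hg]
    have hk1 : ((k : Int)) + 1 = ((k + 1 : Nat) : Int) := by push_cast; ring
    unfold partsFrom_get_year
    split
    · rw [hk1, ← partsFrom_eq_pIdx ys (k + 1)]
    · rw [hk1, ← partsFrom_eq_pIdx ys (k + 1)]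
  · rw [List.drop_eq_nil_of_le (by omega)]
    rw [pIdx_get_year, dif_neg (by exact_mod_cast h)]
    rfl
termination_by ys.length - k
decreasing_by all_goals omega

-- inside an unbroken run the values are an arithmetic progression
lemma run_gd_get_year (ys : List Int) (a j : Int)
    (run : ∀ i, a < i → i < j → PySem.List.pyGetD ys i 0 = PySem.List.pyGetD ys (i - 1) 0 + 1) :
    ∀ i, a ≤ i → i < j → PySem.List.pyGetD ys i 0 = PySem.List.pyGetD ys a 0 + (i - a) := by
  intro i hai hij
  rcases eq_or_lt_of_le hai with h | h
  · subst h; simp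
  · have hrec := run_gd_get_year ys a j run (i - 1) (by omega) (by omega)
    rw [run i h hij, hrec]; ring
termination_by i => (i - a).toNat
decreasing_by omega

lemma fmtSegB_eq_fmtA (ys : List Int) (a j : Int) (haj : a < j)
    (run : ∀ i, a < i → i < j → PySem.List.pyGetD ys i 0 = PySem.List.pyGetD ys (i - 1) 0 + 1) :
    fmtSegB ys a j = fmtA_get_year (PySem.List.pyGetD ys a 0) (PySem.List.pyGetD ys (j - 1) 0) := by
  have hlast := run_gd_get_year ys a j run (j - 1) (by omega) (by omega)
  unfold fmtSegB fmtA_get_year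
  by_cases h1 : j - a = 1
  · rw [if_pos h1, if_pos (by omega)]
  · rw [if_neg h1, if_neg (by omega)]

-- main invariant: from position j inside the run that started at a (no breaks in (a, j)),
-- B's formatted segments coincide with A's re-indexed loop
lemma segs_eq_pIdx (ys : List Int) (j a : Int) (ha : 0 ≤ a) (haj : a < j)
    (hj : j ≤ (ys.length : Int))
    (run : ∀ i, a < i → i < j → PySem.List.pyGetD ys i 0 = PySem.List.pyGetD ys (i - 1) 0 + 1) :
    ((segsOf_get_year a ((PySem.List.pyRange j (ys.length : Int) 1).filter (fun i => isBrkB ys i))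
        (ys.length : Int)).map (fun p => fmtSegB ys p.1 p.2))
      = pIdx_get_year ys j (PySem.List.pyGetD ys a 0) (PySem.List.pyGetD ys (j - 1) 0) := by
  by_cases hlt : j < (ys.length : Int)
  · rw [PySem.List.pyRange_one_cons hlt, List.filter_cons]
    by_cases hb : PySem.List.pyGetD ys j 0 = PySem.List.pyGetD ys (j - 1) 0 + 1
    · -- no break at j: the run continues
      have hbrk : isBrkB ys j = false := by simp [isBrkB, hb]
      rw [hbrk, if_neg (by simp)]
      have ih := segs_eq_pIdx ys (j + 1) a ha (by omega) (by omega)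
        (by intro i h1 h2
            by_cases hij : i = j
            · subst hij; exact hb
            · exact run i h1 (by omega))
      conv_rhs => rw [pIdx_get_year]
      rw [dif_pos hlt, if_pos hb, ih]
      norm_num
    · -- break at j: close the segment (a, j)
      have hbrk : isBrkB ys j = true := by simp [isBrkB, hb]
      rw [hbrk, if_pos (by simp)]
      have ih := segs_eq_pIdx ys (j + 1) j (by omega) (by omega) (by omega)
        (by intro i h1 h2; omega)
      simp only [segsOf_get_year, List.map_cons]
      conv_rhs => rw [pIdx_get_year]
      rw [dif_pos hlt, if_neg hb, ih, fmtSegB_eq_fmtA ys a j haj run]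
      norm_num
  · -- j = len: last segment (a, len)
    have hje : j = (ys.length : Int) := by omega
    subst hje
    rw [PySem.List.pyRange_one_eq_nil le_rfl]
    simp only [List.filter_nil, segsOf_get_year, List.map_cons, List.map_nil]
    rw [pIdx_get_year, dif_neg (by omega), fmtSegB_eq_fmtA ys a _ haj run]
termination_by ((ys.length : Int) - j).toNat
decreasing_by all_goals omega

-- ===== VERDICT (by name: the statement is the Claim_ definition above) =====
theorem get_year_aggregation_py_spec : Claim_equal_get_year_aggregation_py := by
  intro years _
  unfold Spec_get_year_aggregation_py get_year_aggregation_py get_year_aggregation_py_alt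
  cases hs : PySem.List.sorted years (fun x => x) false with
  | nil => rfl
  | cons y t =>
      have hn : ((y :: t).length : Int) ≠ 0 := by
        simp only [List.length_cons]; push_cast; omega
      simp only [hn, if_false, List.tail_cons]
      rw [loopA_eq_partsFrom, List.nil_append]
      rw [zip_bounds_eq_segsOf]
      rw [segs_eq_pIdx (y :: t) 1 0 le_rfl (by omega) (by simp) (by intro i h1 h2; omega)]
      have h0 : PySem.List.pyGetD (y :: t) 0 0 = y := by simp [PySem.List.pyGetD_zero_cons]
      rw [show (1 : Int) - 1 = 0 by ring, h0]
      have := partsFrom_eq_pIdx (y :: t) 1 y y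
      simp only [List.drop_succ_cons, List.drop_zero, Nat.cast_one] at this
      rw [← this]
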